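-- pv_equiv track=rewrite | github.com/hding49/lcPractice | affirm/phone screen/string-compression-decompression.py | decompress_multi
-- ===== SOURCE A (Python) =====
-- def decompress_multi(s: str) -> str:
--     """解压缩，支持多位数字次数。"""
--     res, i = [], 0
--     while i < len(s):
--         ch = s[i]
--         i += 1
--         num = ""
--         while i < len(s) and s[i].isdigit():
--             num += s[i]
--             i += 1
--         cnt = int(num) if num else 1
--         res.append(ch * cnt)
--     return "".join(res)
-- ===== SOURCE B (Python) =====
-- def decompress_multi(s: str) -> str:
--     """解压缩，支持多位数字次数。"""
--     tokens = []  # list of [char, digit-string] pairs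
--     for c in s:
--         if tokens and c.isdigit():
--             tokens[-1][1] += c
--         else:
--             tokens.append([c, ""])
--     return "".join(ch * (int(num) if num else 1) for ch, num in tokens)
-- ===== Notes on version B (the rewrite author's own statement) =====
-- stated objective: alternative
-- what changed: Replaces A's index-based outer/inner while scan (two-pointer parsing that builds each run in place) by a two-phase pipeline: one flat pass tokenizes the string into (char, digit-string) pairs by extending the last token on a digit, then a separate expansion pass joins ch * (int(num) if num else 1) over the token list.
import Mathlib
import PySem

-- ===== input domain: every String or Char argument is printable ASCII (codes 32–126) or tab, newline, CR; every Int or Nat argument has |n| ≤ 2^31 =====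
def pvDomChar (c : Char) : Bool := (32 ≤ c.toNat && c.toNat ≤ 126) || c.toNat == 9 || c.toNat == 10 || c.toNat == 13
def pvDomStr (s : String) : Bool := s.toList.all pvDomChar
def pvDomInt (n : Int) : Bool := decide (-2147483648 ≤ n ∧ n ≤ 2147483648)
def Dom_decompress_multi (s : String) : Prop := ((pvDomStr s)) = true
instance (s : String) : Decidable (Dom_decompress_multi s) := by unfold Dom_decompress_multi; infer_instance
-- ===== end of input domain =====

-- B replaces A's index-based nested-while scan by a flat tokenize-then-expand pass (objective: alternative, same cost).

-- expansion 'ch * (int(num) if num else 1)' — this exact expression occurs in both Pythons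
def pvExpand (ch : Char) (num : List Char) : List Char :=
  let cnt : Int := if num = [] then 1 else (PySem.Int.ofChars? num).getD 0
  List.replicate cnt.toNat ch

-- ===== PORT A =====
-- inner while: collect the digit run after the current char, extending num
def pvAInner (num : List Char) (l : List Char) : List Char × List Char :=
  match l with
  | [] => (num, [])
  | c :: rest => if PySem.Chars.isdigit c then pvAInner (num ++ [c]) rest else (num, c :: rest)

theorem pvAInner_snd_le (num l) : (pvAInner num l).2.length ≤ l.length := by
  induction l generalizing num with
  | nil => simp [pvAInner]
  | cons c rest ih =>
    simp only [pvAInner]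
    split
    · exact Nat.le_trans (ih _) (by simp)
    · simp

-- outer while over the remaining characters, res accumulated
def pvALoop (l : List Char) (res : List (List Char)) : List (List Char) :=
  match l with
  | [] => res
  | ch :: rest =>
    let p := pvAInner [] rest
    pvALoop p.2 (res ++ [pvExpand ch p.1])
termination_by l.length
decreasing_by
  have := pvAInner_snd_le [] rest; simpa using Nat.lt_succ_of_le this

def decompress_multi (s : String) : String :=
  String.mk (PySem.Chars.join [] (pvALoop s.toList []))

-- ===== PORT B =====
-- one loop step: extend the last token's digit string, or start a new token
def pvTokStep (toks : List (Char × List Char)) (c : Char) : List (Char × List Char) :=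
  match toks.getLast? with
  | some (ch, num) =>
      if PySem.Chars.isdigit c then toks.dropLast ++ [(ch, num ++ [c])]
      else toks ++ [(c, [])]
  | none => toks ++ [(c, [])]

def decompress_multi_alt (s : String) : String :=
  let toks := s.toList.foldl pvTokStep []
  String.mk (PySem.Chars.join [] (toks.map (fun t => pvExpand t.1 t.2)))

-- ===== PRECONDITION & SPEC =====
def Spec_decompress_multi (s : String) (out : String) : Prop := out = decompress_multi_alt s
instance (s : String) (out : String) : Decidable (Spec_decompress_multi s out) := by unfold Spec_decompress_multi; infer_instance

-- ===== CLAIM (what is proved, stated in full; the proofs are below) =====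
def Claim_equal_decompress_multi : Prop := ∀ (s : String), Dom_decompress_multi s → Spec_decompress_multi s (decompress_multi s)

-- ===== LEMMAS AND PROOFS =====

-- proof-side characterization: the token list of a character list
def pvTk (l : List Char) : List (Char × List Char) :=
  match l with
  | [] => []
  | c :: rest =>
    (c, rest.takeWhile PySem.Chars.isdigit) :: pvTk (rest.dropWhile PySem.Chars.isdigit)
termination_by l.length
decreasing_by
  simpa using Nat.lt_succ_of_le (rest.length_dropWhile_le _)

theorem pvAInner_eq (num l) :
    pvAInner num l = (num ++ l.takeWhile PySem.Chars.isdigit, l.dropWhile PySem.Chars.isdigit) := by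
  induction l generalizing num with
  | nil => simp [pvAInner]
  | cons c rest ih =>
    simp only [pvAInner, List.takeWhile, List.dropWhile]
    by_cases h : PySem.Chars.isdigit c
    · simp [h, ih]
    · simp [h]

theorem pvALoop_eq (l res) : pvALoop l res = res ++ (pvTk l).map (fun t => pvExpand t.1 t.2) := by
  induction hn : l.length using Nat.strong_induction_on generalizing l res with
  | _ n ih =>
    match l with
    | [] => simp [pvALoop, pvTk]
    | ch :: rest =>
      rw [pvALoop, pvAInner_eq]
      rw [ih (rest.dropWhile PySem.Chars.isdigit).length
            (by simpa [← hn] using Nat.lt_succ_of_le (rest.length_dropWhile_le _)) _ _ rfl]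
      rw [pvTk]
      simp

theorem pvTokStep_foldl (l : List Char) (ts : List (Char × List Char)) (ch : Char) (num : List Char) :
    l.foldl pvTokStep (ts ++ [(ch, num)])
      = ts ++ [(ch, num ++ l.takeWhile PySem.Chars.isdigit)]
          ++ pvTk (l.dropWhile PySem.Chars.isdigit) := by
  induction l generalizing ts ch num with
  | nil => simp [pvTk]
  | cons c rest ih =>
    simp only [List.foldl_cons, List.takeWhile, List.dropWhile]
    by_cases h : PySem.Chars.isdigit c
    · have hstep : pvTokStep (ts ++ [(ch, num)]) c = ts ++ [(ch, num ++ [c])] := by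
        simp [pvTokStep, h]
      rw [hstep, ih]
      simp [h]
    · have hstep : pvTokStep (ts ++ [(ch, num)]) c = (ts ++ [(ch, num)]) ++ [(c, [])] := by
        simp [pvTokStep, h]
      rw [hstep, ih (ts ++ [(ch, num)]) c []]
      conv_rhs => rw [pvTk.eq_def]
      simp [h]

theorem pvTok_eq (l : List Char) : l.foldl pvTokStep [] = pvTk l := by
  match l with
  | [] => simp [pvTk]
  | c :: rest =>
    have hstep : pvTokStep [] c = [(c, [])] := by simp [pvTokStep]
    rw [List.foldl_cons, hstep]
    have := pvTokStep_foldl rest [] c []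
    simpa [pvTk] using this

-- ===== VERDICT (by name: the statement is the Claim_ definition above) =====
theorem decompress_multi_spec : Claim_equal_decompress_multi := by
  intro s _
  unfold Spec_decompress_multi decompress_multi decompress_multi_alt
  rw [pvALoop_eq, pvTok_eq]
  simp
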